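-- pv_equiv track=rewrite | github.com/xang1234/stock-screener | backend/app/services/cn_universe_ingestion_adapter.py | _strip_symbol_decoration
-- ===== SOURCE A (Python) =====
-- def _strip_symbol_decoration(source_symbol: str) -> str:
--     token = source_symbol
--     for prefix in ("SSE:", "SHSE:", "XSHG:", "SH:", "SZSE:", "XSHE:", "SZ:", "BSE:", "BJSE:", "XBSE:", "XBEI:", "BJ:"):
--         if token.startswith(prefix):
--             token = token[len(prefix):]
--             break
--     for suffix in (".SS", ".SZ", ".BJ"):
--         if token.endswith(suffix):
--             token = token[: -len(suffix)]
--             break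
--     return token
-- ===== SOURCE B (Python) =====
-- # B: instead of scanning a tuple of candidate prefixes/suffixes with startswith/endswith,
-- # split the symbol once at the first colon / last dot and test the delimited piece against a set of exchange codes.
-- _PREFIX_CODES = {"SSE", "SHSE", "XSHG", "SH", "SZSE", "XSHE", "SZ", "BSE", "BJSE", "XBSE", "XBEI", "BJ"}
-- _SUFFIX_CODES = {"SS", "SZ", "BJ"}
--
--
-- def _strip_symbol_decoration(source_symbol: str) -> str:
--     head, colon, rest = source_symbol.partition(":")
--     token = rest if colon and head in _PREFIX_CODES else source_symbol
--     stem, dot, tail = token.rpartition(".")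
--     return stem if dot and tail in _SUFFIX_CODES else token
-- ===== Notes on version B (the rewrite author's own statement) =====
-- stated objective: alternative
-- what changed: Replaces the two scan-the-candidate-tuple loops (startswith/endswith per candidate, break on first hit) with a single partition at the first colon / rpartition at the last dot followed by a set-membership test of the delimited exchange code.
import Mathlib
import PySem

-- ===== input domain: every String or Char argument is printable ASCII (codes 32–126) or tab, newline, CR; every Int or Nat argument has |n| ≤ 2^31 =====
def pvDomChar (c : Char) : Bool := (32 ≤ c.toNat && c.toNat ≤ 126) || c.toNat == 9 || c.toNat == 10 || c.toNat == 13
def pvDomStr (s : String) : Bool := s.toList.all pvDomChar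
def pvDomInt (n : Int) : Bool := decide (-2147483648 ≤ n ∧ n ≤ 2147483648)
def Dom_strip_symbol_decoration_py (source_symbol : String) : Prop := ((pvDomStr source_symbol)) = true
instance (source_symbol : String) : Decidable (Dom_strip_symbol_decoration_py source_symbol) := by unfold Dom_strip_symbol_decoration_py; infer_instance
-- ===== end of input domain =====

-- B replaces A's scan over candidate prefixes/suffixes by one partition at the first colon (resp. last dot)
-- plus a membership test of the delimited exchange code; same return value, alternative algorithm.

-- ===== PORT A =====
def pvAprefixes : List (List Char) :=
  ["SSE:".toList, "SHSE:".toList, "XSHG:".toList, "SH:".toList, "SZSE:".toList, "XSHE:".toList,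
   "SZ:".toList, "BSE:".toList, "BJSE:".toList, "XBSE:".toList, "XBEI:".toList, "BJ:".toList]

def pvAsuffixes : List (List Char) := [".SS".toList, ".SZ".toList, ".BJ".toList]

-- the first for-loop: try each prefix in order, strip and break at the first match
def pvAstripPrefix : List (List Char) → List Char → List Char
  | [], token => token
  | p :: ps, token =>
    if PySem.Chars.startswith token p then PySem.Chars.slice token (some (p.length : Int)) none
    else pvAstripPrefix ps token

-- the second for-loop: try each suffix in order, strip and break at the first match
def pvAstripSuffix : List (List Char) → List Char → List Char
  | [], token => token
  | s :: ss, token =>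
    if PySem.Chars.endswith token s then PySem.Chars.slice token none (some (-(s.length : Int)))
    else pvAstripSuffix ss token

def strip_symbol_decoration_py (source_symbol : String) : String :=
  String.ofList (pvAstripSuffix pvAsuffixes (pvAstripPrefix pvAprefixes source_symbol.toList))

-- ===== PORT B =====
def pvPrefixCodes : List (List Char) :=
  ["SSE".toList, "SHSE".toList, "XSHG".toList, "SH".toList, "SZSE".toList, "XSHE".toList,
   "SZ".toList, "BSE".toList, "BJSE".toList, "XBSE".toList, "XBEI".toList, "BJ".toList]

def pvSuffixCodes : List (List Char) := ["SS".toList, "SZ".toList, "BJ".toList]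

-- exact port of str.partition for a one-character separator: (part before first sep, sep found?, part after)
def pvPartition (sep : Char) : List Char → List Char × Bool × List Char
  | [] => ([], false, [])
  | c :: rest =>
    if c = sep then ([], true, rest)
    else
      let r := pvPartition sep rest
      (c :: r.1, r.2.1, r.2.2)

-- exact port of str.rpartition for a one-character separator: (part before last sep, sep found?, part after)
def pvRPartition (sep : Char) (cs : List Char) : List Char × Bool × List Char :=
  let r := pvPartition sep cs.reverse
  (r.2.2.reverse, r.2.1, r.1.reverse)

def strip_symbol_decoration_py_alt (source_symbol : String) : String :=
  let cs := source_symbol.toList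
  let pr := pvPartition ':' cs
  let token := if pr.2.1 && pvPrefixCodes.contains pr.1 then pr.2.2 else cs
  let rp := pvRPartition '.' token
  String.ofList (if rp.2.1 && pvSuffixCodes.contains rp.2.2 then rp.1 else token)

-- ===== PRECONDITION & SPEC =====
def Spec_strip_symbol_decoration_py (source_symbol : String) (out : String) : Prop := out = strip_symbol_decoration_py_alt source_symbol
instance (source_symbol : String) (out : String) : Decidable (Spec_strip_symbol_decoration_py source_symbol out) := by unfold Spec_strip_symbol_decoration_py; infer_instance

-- ===== CLAIM (what is proved, stated in full; the proofs are below) =====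
def Claim_equal_strip_symbol_decoration_py : Prop := ∀ (source_symbol : String), Dom_strip_symbol_decoration_py source_symbol → Spec_strip_symbol_decoration_py source_symbol (strip_symbol_decoration_py source_symbol)

-- ===== LEMMAS AND PROOFS =====

-- if the separator is found, the input is (before) ++ sep :: (after) and sep does not occur in (before);
-- if not, (before) is the whole input and (after) is empty
lemma pvPartition_spec (sep : Char) (cs : List Char) :
    sep ∉ (pvPartition sep cs).1 ∧
      (if (pvPartition sep cs).2.1 then
        cs = (pvPartition sep cs).1 ++ sep :: (pvPartition sep cs).2.2
      else cs = (pvPartition sep cs).1 ∧ (pvPartition sep cs).2.2 = []) := by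
  induction cs with
  | nil => simp [pvPartition]
  | cons c rest ih =>
    by_cases h : c = sep
    · simp [pvPartition, h]
    · rcases ih with ⟨ih1, ih2⟩
      constructor
      · simp only [pvPartition, if_neg h]
        simp
        exact ⟨fun he => h he.symm, ih1⟩
      · by_cases hb : (pvPartition sep rest).2.1
        · simp [pvPartition, h, hb] at ih2 ⊢
          exact ih2
        · simp [pvPartition, h, hb] at ih2 ⊢
          exact ih2
  
lemma pvPartition_append (sep : Char) (code rest : List Char) (h : sep ∉ code) :
    pvPartition sep (code ++ sep :: rest) = (code, true, rest) := by
  induction code with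
  | nil => simp [pvPartition]
  | cons c cs ih =>
    simp at h
    have hne : ¬ c = sep := fun he => h.1 he.symm
    simp [pvPartition, hne, ih h.2]

lemma stripPrefix_eq (codes : List (List Char)) (cs : List Char)
    (h : ∀ c ∈ codes, ':' ∉ c) :
    pvAstripPrefix (codes.map (· ++ [':'])) cs =
      (if (pvPartition ':' cs).2.1 ∧ (pvPartition ':' cs).1 ∈ codes then (pvPartition ':' cs).2.2
       else cs) := by
  induction codes with
  | nil => simp [pvAstripPrefix]
  | cons c codes ih =>
    have hc : ':' ∉ c := h c (by simp)
    by_cases hs : PySem.Chars.startswith cs (c ++ [':']) = true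
    · obtain ⟨t, ht⟩ := (PySem.Chars.startswith_iff cs (c ++ [':'])).1 hs
      have hpart : pvPartition ':' cs = (c, true, t) := by
        rw [← ht]
        simpa using pvPartition_append ':' c t hc
      simp only [List.map_cons, pvAstripPrefix, hs, if_true]
      rw [hpart]
      simp only [List.mem_cons, true_or, and_true, if_true]
      rw [PySem.Chars.slice_eq_listSlice, PySem.List.slice_from_natCast]
      rw [← ht]
      simp
    · simp only [List.map_cons, pvAstripPrefix, hs, if_false, Bool.false_eq_true]
      rw [ih (fun d hd => h d (by simp [hd]))]
      have hne : ¬((pvPartition ':' cs).2.1 = true ∧ (pvPartition ':' cs).1 = c) := by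
        rintro ⟨hb, he⟩
        have := (pvPartition_spec ':' cs).2
        rw [if_pos hb, he] at this
        exact hs ((PySem.Chars.startswith_iff cs (c ++ [':'])).2
          ⟨(pvPartition ':' cs).2.2, by simpa using this.symm⟩)
      by_cases hb : (pvPartition ':' cs).2.1 = true
      · have hne' : (pvPartition ':' cs).1 ≠ c := fun he => hne ⟨hb, he⟩
        simp [hb, hne']
      · simp [hb]

lemma endswith_iff_rev (cs p : List Char) :
    PySem.Chars.endswith cs p = true ↔ p.reverse <+: cs.reverse := by
  rw [PySem.Chars.endswith_iff]
  exact (List.reverse_prefix).symm.trans (by simp)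

lemma stripSuffix_eq (codes : List (List Char)) (cs : List Char)
    (h : ∀ c ∈ codes, '.' ∉ c) :
    pvAstripSuffix (codes.map (fun c => '.' :: c)) cs =
      (if (pvRPartition '.' cs).2.1 ∧ (pvRPartition '.' cs).2.2 ∈ codes then (pvRPartition '.' cs).1
       else cs) := by
  induction codes with
  | nil => simp [pvAstripSuffix]
  | cons c codes ih =>
    have hc : '.' ∉ c.reverse := by simpa using h c (by simp)
    by_cases hs : PySem.Chars.endswith cs ('.' :: c) = true
    · obtain ⟨t, ht⟩ := (endswith_iff_rev cs ('.' :: c)).1 hs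
      -- cs.reverse = c.reverse ++ '.' :: t
      have ht' : cs.reverse = c.reverse ++ '.' :: t := by simpa using ht.symm
      have hpart : pvPartition '.' cs.reverse = (c.reverse, true, t) := by
        rw [ht']; exact pvPartition_append '.' c.reverse t hc
      have hrp : pvRPartition '.' cs = (t.reverse, true, c) := by
        simp [pvRPartition, hpart]
      have hcs : cs = t.reverse ++ '.' :: c := by
        have := congrArg List.reverse ht'
        simpa using this
      simp only [List.map_cons, pvAstripSuffix, hs, if_true]
      rw [hrp]
      simp only [List.mem_cons, true_or, and_true, if_true]
      rw [PySem.Chars.slice_eq_listSlice,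
        PySem.List.slice_to_neg_natCast cs ('.' :: c).length (by simp)]
      rw [hcs]
      have hl : (t.reverse ++ '.' :: c).length - ('.' :: c).length = t.reverse.length := by
        simp
      rw [hl]
      exact List.take_left
    · simp only [List.map_cons, pvAstripSuffix, hs, if_false, Bool.false_eq_true]
      rw [ih (fun d hd => h d (by simp [hd]))]
      have hne : ¬((pvRPartition '.' cs).2.1 = true ∧ (pvRPartition '.' cs).2.2 = c) := by
        rintro ⟨hb, he⟩
        have hb' : (pvPartition '.' cs.reverse).2.1 = true := by
          simp [pvRPartition] at hb
          exact hb
        have hspec := (pvPartition_spec '.' cs.reverse).2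
        rw [if_pos hb'] at hspec
        have he' : (pvPartition '.' cs.reverse).1.reverse = c := by
          simpa [pvRPartition] using he
        have hh : (pvPartition '.' cs.reverse).1 = c.reverse := by
          rw [← he']; simp
        have hcs' : cs.reverse = c.reverse ++ '.' :: (pvPartition '.' cs.reverse).2.2 := by
          rw [← hh]; exact hspec
        apply hs
        rw [endswith_iff_rev]
        refine ⟨(pvPartition '.' cs.reverse).2.2, ?_⟩
        conv_rhs => rw [hcs']
        simp
      by_cases hb : (pvRPartition '.' cs).2.1 = true
      · have hne' : (pvRPartition '.' cs).2.2 ≠ c := fun he => hne ⟨hb, he⟩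
        simp [hb, hne']
      · simp [hb]

-- ===== VERDICT (by name: the statement is the Claim_ definition above) =====
theorem strip_symbol_decoration_py_spec : Claim_equal_strip_symbol_decoration_py := by
  intro s _
  unfold Spec_strip_symbol_decoration_py strip_symbol_decoration_py strip_symbol_decoration_py_alt
  have hpre : pvAprefixes = pvPrefixCodes.map (· ++ [':']) := by decide
  have hsuf : pvAsuffixes = pvSuffixCodes.map (fun c => '.' :: c) := by decide
  rw [hpre, hsuf,
    stripPrefix_eq pvPrefixCodes s.toList (by decide),
    stripSuffix_eq pvSuffixCodes _ (by decide)]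
  simp only [Bool.and_eq_true, List.contains_iff_mem]
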